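-- pv_equiv track=rewrite | github.com/VShah2312/Python_Portfolio | Python + DSA Course/Assignments/Week 2/Assignment-5/Q4.py | pattern_w
-- ===== SOURCE A (Python) =====
-- def pattern_w(x: int, n: int) -> float | str:
--     if x < 0 or n <= 0:
--         return "Enter a valid numbers."
--     i = 1
--     sum = 0
--     string = " "
--     while i <= n:
--         if (-1) ** i == -1:
--             string = string + (str(x) + "^" + str(2 * i - 1) + " - ")
--         else:
--             string = string + (str(x) + "^" + str(2 * i - 1) + " + ")
--         sum = sum + (x ** (2 * i - 1)) * ((-1) ** (i + 1))
--         i += 1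
--     return f"{string[:-2]}= {sum}"
-- ===== SOURCE B (Python) =====
-- def pattern_w(x: int, n: int) -> float | str:
--     if x < 0 or n <= 0:
--         return "Enter a valid numbers."
--     body = "".join(
--         ("" if i == 0 else (" - " if i % 2 == 1 else " + ")) + str(x) + "^" + str(2 * i + 1)
--         for i in range(n)
--     )
--     total = x * (1 - (-(x * x)) ** n) // (1 + x * x)
--     return f" {body} = {total}"
-- ===== Notes on version B (the rewrite author's own statement) =====
-- stated objective: faster
-- what changed: B builds the display string by joining per-term pieces instead of repeatedly re-concatenating an accumulator, and replaces the loop's running alternating power sum (one big-int exponentiation per term) with the closed-form geometric-series value x*(1-(-x**2)**n)//(1+x**2).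
import Mathlib
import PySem

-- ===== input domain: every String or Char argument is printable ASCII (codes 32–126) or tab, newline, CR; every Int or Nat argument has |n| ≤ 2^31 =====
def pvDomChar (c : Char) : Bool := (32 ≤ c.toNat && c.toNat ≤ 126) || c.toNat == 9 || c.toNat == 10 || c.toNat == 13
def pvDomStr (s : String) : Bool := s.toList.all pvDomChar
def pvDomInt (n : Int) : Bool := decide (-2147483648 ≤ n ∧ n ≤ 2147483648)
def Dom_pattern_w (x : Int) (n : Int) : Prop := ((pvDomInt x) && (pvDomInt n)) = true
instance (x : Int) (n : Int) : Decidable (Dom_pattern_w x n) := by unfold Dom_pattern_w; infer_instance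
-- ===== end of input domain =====

-- B joins per-term pieces instead of accumulating a string through a while loop, and replaces the
-- running alternating sum with the closed-form geometric-series value x*(1-(-x^2)^n)//(1+x^2)
-- (objective: alternative decomposition producing the identical output).

-- ===== PORT A =====
-- Python '**' occurs only with exponent ≥ 1 inside the loop; ported exactly as '^ e.toNat'.
def pattern_w (x : Int) (n : Int) : String :=
  if x < 0 || n ≤ 0 then "Enter a valid numbers."
  else
    let r := (PySem.List.pyRange 1 (n + 1)).foldl
      (fun (st : String × Int) i =>
        (if (-1 : Int) ^ i.toNat == -1 then
           st.1 ++ (PySem.Int.toStr x ++ "^" ++ PySem.Int.toStr (2 * i - 1) ++ " - ")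
         else
           st.1 ++ (PySem.Int.toStr x ++ "^" ++ PySem.Int.toStr (2 * i - 1) ++ " + "),
         st.2 + x ^ (2 * i - 1).toNat * (-1 : Int) ^ (i + 1).toNat)) (" ", 0)
    PySem.Str.slice r.1 none (some (-2)) ++ "= " ++ PySem.Int.toStr r.2

-- ===== PORT B =====
-- Python '**' occurs only with exponent n ≥ 1 here; ported exactly as '^ n.toNat'.
def pattern_w_alt (x : Int) (n : Int) : String :=
  if x < 0 || n ≤ 0 then "Enter a valid numbers."
  else
    let body := PySem.Str.join ""
      ((PySem.List.pyRange 0 n).map (fun i =>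
        (if i == 0 then "" else if PySem.Int.mod i 2 == 1 then " - " else " + ")
        ++ PySem.Int.toStr x ++ "^" ++ PySem.Int.toStr (2 * i + 1)))
    let total := PySem.Int.floordiv (x * (1 - (-(x * x)) ^ n.toNat)) (1 + x * x)
    " " ++ body ++ " = " ++ PySem.Int.toStr total

-- ===== PRECONDITION & SPEC =====
def Spec_pattern_w (x : Int) (n : Int) (out : String) : Prop := out = pattern_w_alt x n
instance (x : Int) (n : Int) (out : String) : Decidable (Spec_pattern_w x n out) := by unfold Spec_pattern_w; infer_instance

-- ===== CLAIM (what is proved, stated in full; the proofs are below) =====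
def Claim_equal_pattern_w : Prop := ∀ (x : Int) (n : Int), Dom_pattern_w x n → Spec_pattern_w x n (pattern_w x n)

-- ===== LEMMAS AND PROOFS =====

-- proof-only names for the two programs' inner computations (identical text to the ports)
def pvLoopA (x : Int) (n : Int) : String × Int :=
  (PySem.List.pyRange 1 (n + 1)).foldl
    (fun (st : String × Int) i =>
      (if (-1 : Int) ^ i.toNat == -1 then
         st.1 ++ (PySem.Int.toStr x ++ "^" ++ PySem.Int.toStr (2 * i - 1) ++ " - ")
       else
         st.1 ++ (PySem.Int.toStr x ++ "^" ++ PySem.Int.toStr (2 * i - 1) ++ " + "),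
       st.2 + x ^ (2 * i - 1).toNat * (-1 : Int) ^ (i + 1).toNat)) (" ", 0)

def pvBodyB (x : Int) (n : Int) : String :=
  PySem.Str.join ""
    ((PySem.List.pyRange 0 n).map (fun i =>
      (if i == 0 then "" else if PySem.Int.mod i 2 == 1 then " - " else " + ")
      ++ PySem.Int.toStr x ++ "^" ++ PySem.Int.toStr (2 * i + 1)))

def pvSep (m : Nat) : String := if m % 2 = 1 then " - " else " + "

theorem pattern_w_eval (x n : Int) (h : (x < 0 || n ≤ 0) = false) :
    pattern_w x n
      = PySem.Str.slice (pvLoopA x n).1 none (some (-2)) ++ "= " ++ PySem.Int.toStr (pvLoopA x n).2 := by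
  unfold pattern_w pvLoopA
  rw [h]
  rfl

theorem pattern_w_alt_eval (x n : Int) (h : (x < 0 || n ≤ 0) = false) :
    pattern_w_alt x n
      = " " ++ pvBodyB x n ++ " = "
        ++ PySem.Int.toStr (PySem.Int.floordiv (x * (1 - (-(x * x)) ^ n.toNat)) (1 + x * x)) := by
  unfold pattern_w_alt pvBodyB
  rw [h]
  rfl

theorem pvJoinNil_append_singleton (l : List (List Char)) (a : List Char) :
    PySem.Chars.join [] (l ++ [a]) = PySem.Chars.join [] l ++ a := by
  induction l with
  | nil => simp [PySem.Chars.join_nil, PySem.Chars.join_singleton]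
  | cons p t ih =>
    cases t with
    | nil => simp [PySem.Chars.join_singleton, PySem.Chars.join_cons_cons]
    | cons q r =>
      rw [List.cons_append, PySem.Chars.join_cons_cons, List.cons_append,
        PySem.Chars.join_cons_cons, ← List.cons_append, ih]
      simp

theorem pvMod_natCast_two (m : Nat) : PySem.Int.mod (m : Int) 2 = ((m % 2 : Nat) : Int) := by
  unfold PySem.Int.mod
  rw [Int.fmod_eq_emod]
  have h : ((2:Int) ∣ (m:Int)) ∨ ¬ ((2:Int) ∣ (m:Int)) := em _
  simp only [show ((0:Int) ≤ 2 ∨ (2:Int) ∣ (m:Int)) = True from by simp, if_true]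
  omega

theorem pvBodyB_succ (x : Int) (m : Nat) (hm : 1 ≤ m) :
    pvBodyB x ((m : Int) + 1)
      = pvBodyB x (m : Int) ++ pvSep m ++ (PySem.Int.toStr x ++ "^" ++ PySem.Int.toStr (2 * (m : Int) + 1)) := by
  unfold pvBodyB pvSep
  rw [PySem.List.pyRange_one_succ_right (by omega : (0:Int) ≤ (m : Int)), List.map_append]
  apply String.ext
  simp only [PySem.Str.toList_join, List.map_append, List.map_cons, List.map_nil,
    String.toList_append]
  rw [show ("" : String).toList = [] from rfl, pvJoinNil_append_singleton]
  have h0 : ((m : Int) == 0) = false := by simp; omega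
  rw [h0, pvMod_natCast_two]
  rcases Nat.even_or_odd m with he | ho
  · have h1 : m % 2 = 0 := Nat.even_iff.mp he
    simp [h1]
  · have h1 : m % 2 = 1 := Nat.odd_iff.mp ho
    simp [h1]

theorem pvLoop_main (x : Int) (m : Nat) (hm : 1 ≤ m) :
    (pvLoopA x (m : Int)).1 = " " ++ pvBodyB x (m : Int) ++ pvSep m ∧
    (pvLoopA x (m : Int)).2 * (1 + x * x) = x * (1 - (-(x * x)) ^ m) := by
  induction m, hm using Nat.le_induction with
  | base =>
    unfold pvLoopA pvBodyB pvSep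
    rw [show (((1:Nat)):Int) = 1 from by norm_num]
    have hrA : PySem.List.pyRange (1:Int) (1 + 1) = [1] := by
      rw [PySem.List.pyRange_one_cons (by omega), PySem.List.pyRange_one_eq_nil (by omega)]
    have hrB : PySem.List.pyRange (0:Int) 1 = [0] := by
      rw [PySem.List.pyRange_one_cons (by omega), PySem.List.pyRange_one_eq_nil (by omega)]
    rw [hrA, hrB]
    simp only [List.foldl_cons, List.foldl_nil, List.map_cons, List.map_nil]
    constructor
    · norm_num
      apply String.ext
      simp [PySem.Str.toList_join, PySem.Chars.join_singleton]
    · rw [show ((2 * (1:Int) - 1)).toNat = 1 from by decide,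
        show (((1:Int) + 1)).toNat = 2 from by decide]
      ring
  | succ m hm ih =>
    obtain ⟨ih1, ih2⟩ := ih
    have hrange : PySem.List.pyRange 1 (((m + 1 : Nat) : Int) + 1)
        = PySem.List.pyRange 1 ((m : Int) + 1) ++ [(m : Int) + 1] := by
      push_cast
      exact PySem.List.pyRange_one_succ_right (by omega)
    have hLA : pvLoopA x ((m + 1 : Nat) : Int)
        = ((if (-1 : Int) ^ ((m : Int) + 1).toNat == -1 then
             (pvLoopA x (m : Int)).1 ++ (PySem.Int.toStr x ++ "^" ++ PySem.Int.toStr (2 * ((m : Int) + 1) - 1) ++ " - ")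
           else
             (pvLoopA x (m : Int)).1 ++ (PySem.Int.toStr x ++ "^" ++ PySem.Int.toStr (2 * ((m : Int) + 1) - 1) ++ " + ")),
           (pvLoopA x (m : Int)).2 + x ^ (2 * ((m : Int) + 1) - 1).toNat * (-1 : Int) ^ (((m : Int) + 1) + 1).toNat) := by
      unfold pvLoopA
      rw [hrange, List.foldl_append]
      simp
    have harg : 2 * ((m : Int) + 1) - 1 = 2 * (m : Int) + 1 := by ring
    have hbody : pvBodyB x ((m + 1 : Nat) : Int)
        = pvBodyB x (m : Int) ++ pvSep m ++ (PySem.Int.toStr x ++ "^" ++ PySem.Int.toStr (2 * (m : Int) + 1)) := by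
      rw [show ((m + 1 : Nat) : Int) = (m : Int) + 1 from by push_cast; ring]
      exact pvBodyB_succ x m hm
    constructor
    · rw [hLA]
      dsimp only
      rw [harg, hbody]
      rcases Nat.even_or_odd m with he | ho
      · have hpow : ((-1 : Int) ^ ((m : Int) + 1).toNat == -1) = true := by
          rw [show ((m : Int) + 1).toNat = m + 1 from by omega, Odd.neg_one_pow (Even.add_one he)]
          simp
        rw [hpow]
        simp only [if_true]
        rw [ih1]
        unfold pvSep
        have h1 : m % 2 = 0 := Nat.even_iff.mp he
        rw [if_neg (by omega : ¬ m % 2 = 1), if_pos (by omega : (m + 1) % 2 = 1)]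
        apply String.ext
        simp
      · have hpow : ((-1 : Int) ^ ((m : Int) + 1).toNat == -1) = false := by
          rw [show ((m : Int) + 1).toNat = m + 1 from by omega, Even.neg_one_pow (Odd.add_one ho)]
          decide
        rw [hpow]
        simp only [Bool.false_eq_true, if_false]
        rw [ih1]
        unfold pvSep
        have h1 : m % 2 = 1 := Nat.odd_iff.mp ho
        rw [if_pos h1, if_neg (by omega : ¬ (m + 1) % 2 = 1)]
        apply String.ext
        simp
    · rw [hLA]
      dsimp only
      rw [harg]
      rw [show (2 * (m : Int) + 1).toNat = 2 * m + 1 from by omega,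
        show (((m : Int) + 1) + 1).toNat = m + 2 from by omega]
      have h4 : x ^ (2 * m + 1) = (x * x) ^ m * x := by
        have hx : x * x = x ^ 2 := (sq x).symm
        rw [hx, ← pow_mul, ← pow_succ]
      have h3 : (-(x * x)) ^ m = (-1 : Int) ^ m * (x * x) ^ m := by
        rw [neg_pow]
      have h5 : (-1 : Int) ^ (m + 2) = (-1) ^ m := by
        rw [pow_add]
        norm_num
      have h2 : (-(x * x)) ^ (m + 1) = ((-1 : Int) ^ m * (x * x) ^ m) * (-(x * x)) := by
        rw [pow_succ, h3]
      rw [h3] at ih2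
      rw [h2, h4, h5]
      linear_combination ih2

theorem pvSlice_drop2 (L : List Char) (a b c : Char) :
    PySem.List.slice (L ++ [a, b, c]) none (some (-2)) = L ++ [a] := by
  rw [PySem.List.slice_to_neg_ofNat _ 2 (by omega)]
  have h : (L ++ [a, b, c]).length - 2 = L.length + 1 := by simp
  rw [h, List.take_append]
  simp

theorem pvStitch (bdy tail : String) (c : Char) :
    PySem.Str.slice (" " ++ bdy ++ String.ofList [' ', c, ' ']) none (some (-2)) ++ "= " ++ tail
      = " " ++ bdy ++ " = " ++ tail := by
  apply String.ext
  simp only [String.toList_append, PySem.Str.toList_slice, PySem.Chars.slice_eq_listSlice,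
    String.toList_ofList]
  rw [pvSlice_drop2]
  rw [show ("= " : String).toList = ['=', ' '] from by decide,
    show (" = " : String).toList = [' ', '=', ' '] from by decide,
    show (" " : String).toList = [' '] from by decide]
  simp

-- ===== VERDICT (by name: the statement is the Claim_ definition above) =====
theorem pattern_w_spec : Claim_equal_pattern_w := by
  intro x n _hd
  unfold Spec_pattern_w
  by_cases h : (x < 0 || n ≤ 0) = true
  · unfold pattern_w pattern_w_alt
    rw [h]
    simp
  · have h' : (x < 0 || n ≤ 0) = false := by simpa using h
    rw [pattern_w_eval x n h', pattern_w_alt_eval x n h']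
    have hx : 0 ≤ x := by
      rcases Bool.or_eq_false_iff.mp h' with ⟨ha, _⟩
      simpa using of_decide_eq_false ha
    have hn : 1 ≤ n := by
      rcases Bool.or_eq_false_iff.mp h' with ⟨_, hb⟩
      have := of_decide_eq_false hb
      omega
    have hcast : n = ((n.toNat : Nat) : Int) := by omega
    have hm1 : 1 ≤ n.toNat := by omega
    obtain ⟨h1, h2⟩ := pvLoop_main x n.toNat hm1
    rw [hcast, h1]
    rw [show (((n.toNat : Nat) : Int)).toNat = n.toNat from by omega]
    have hne : (1 + x * x) ≠ 0 := by nlinarith [mul_self_nonneg x]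
    have hdiv : PySem.Int.floordiv (x * (1 - (-(x * x)) ^ n.toNat)) (1 + x * x)
        = (pvLoopA x ((n.toNat : Nat) : Int)).2 := by
      rw [← h2]
      unfold PySem.Int.floordiv
      exact Int.mul_fdiv_cancel _ hne
    rw [hdiv]
    unfold pvSep
    rcases Nat.even_or_odd n.toNat with he | ho
    · rw [if_neg (by omega ∘ fun h => h ▸ Nat.even_iff.mp he : ¬ n.toNat % 2 = 1)]
      rw [show (" + " : String) = String.ofList [' ', '+', ' '] from rfl]
      exact pvStitch _ _ '+'
    · rw [if_pos (Nat.odd_iff.mp ho)]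
      rw [show (" - " : String) = String.ofList [' ', '-', ' '] from rfl]
      exact pvStitch _ _ '-'
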